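-- pv_equiv track=rewrite | github.com/NoUskill/Lab_Asid_1 | PythonApplication18/PythonApplication18.py | GenerationGapsPratta
-- ===== SOURCE A (Python) =====
-- import math
--
-- def GenerationGapsPratta(A):
--     N=len(A)
--     all_gaps=[]
--     for i in range(0,math.ceil(math.log(N,3))):
--         for j in range(0,math.ceil(math.log(N,2))):
--             if((3**i)*(2**j)>N/2):
--                 break
--             else:
--                 all_gaps.append((3**i)*(2**j))
--
--     all_gaps.sort(reverse=True)
--
--     return all_gaps
-- ===== SOURCE B (Python) =====
-- def _merge(xs, ys):
--     # merge two ascending lists, two-pointer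
--     out = []
--     i = j = 0
--     while i < len(xs) and j < len(ys):
--         if xs[i] <= ys[j]:
--             out.append(xs[i]); i += 1
--         else:
--             out.append(ys[j]); j += 1
--     out.extend(xs[i:])
--     out.extend(ys[j:])
--     return out
--
--
-- def GenerationGapsPratta(A):
--     # For each power of 3 build its ascending chain of doublings <= N/2, merge the
--     # sorted chains pairwise, reverse at the end.  No logs, no powers, no sort call.
--     N = len(A)
--     result = []
--     p3 = 1
--     while 2 * p3 <= N:
--         chain = []
--         v = p3
--         while 2 * v <= N:
--             chain.append(v)
--             v *= 2
--         result = _merge(result, chain)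
--         p3 *= 3
--     return result[::-1]
-- ===== Notes on version B (the rewrite author's own statement) =====
-- stated objective: alternative
-- what changed: Instead of a float-log-bounded double loop over exponents that appends 3^i*2^j products and then sorts, B multiplies accumulators (no logs, no pow, no sort): it builds each power-of-3 chain of doublings as an already-ascending list, merges the sorted chains with a two-pointer merge, and reverses at the end.
-- outside the precondition, e.g. on GenerationGapsPratta([]): A raises ValueError, B returns []
import Mathlib
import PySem

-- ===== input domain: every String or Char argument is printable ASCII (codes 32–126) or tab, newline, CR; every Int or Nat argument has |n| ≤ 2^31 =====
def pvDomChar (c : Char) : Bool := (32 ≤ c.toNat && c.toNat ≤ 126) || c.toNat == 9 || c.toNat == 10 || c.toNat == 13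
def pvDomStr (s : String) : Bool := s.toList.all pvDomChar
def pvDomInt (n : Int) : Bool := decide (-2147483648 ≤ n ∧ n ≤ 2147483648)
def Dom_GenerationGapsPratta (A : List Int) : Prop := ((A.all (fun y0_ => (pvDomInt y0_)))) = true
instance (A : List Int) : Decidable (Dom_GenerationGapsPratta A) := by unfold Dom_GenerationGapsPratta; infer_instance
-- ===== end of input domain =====

-- B replaces A's float-log-bounded exponent loops + sort by building each power-of-3 chain of
-- doublings already ascending and merging the sorted chains (two-pointer merge), reversed at the end;
-- objective: alternative (no logs, no pow, no sort call).

-- ===== PORT A =====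
-- math.ceil(math.log(N, b)) ported as the least k with N ≤ b^k (the exact integer ceiling of
-- log_b N).  CPython's float value can only EXCEED this by 1 (it does at N = 2^29, 2^31);
-- there the one extra iteration makes the first product 3^i*2^j already > N/2, hits the
-- break at j = 0 and appends nothing, so the returned list is identical.
def pvCeilLog (b N : Nat) : Nat := (List.range (N + 1)).findIdx (fun k => N ≤ b ^ k)

-- the inner 'for j in range(...)' with its break; the test '(3**i)*(2**j) > N/2' is the exact
-- integer form 2*(3^i*2^j) > N of the float comparison (N/2 is exact, both sides integers).
def pvInnerA (N i : Nat) : List Nat → List Int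
  | [] => []
  | j :: js =>
    if 2 * ((3 : Int) ^ i * (2 : Int) ^ j) > (N : Int) then []
    else ((3 : Int) ^ i * (2 : Int) ^ j) :: pvInnerA N i js

def GenerationGapsPratta (A : List Int) : List Int :=
  let N := A.length
  let all_gaps : List Int :=
    (List.range (pvCeilLog 3 N)).foldl
      (fun acc i => acc ++ pvInnerA N i (List.range (pvCeilLog 2 N))) []
  PySem.List.sorted all_gaps (fun x => x) true

-- ===== PORT B =====
-- two-pointer merge of two ascending lists (indices become structural tails)
def pvMerge : List Int → List Int → List Int
  | [], ys => ys
  | x :: xs, [] => x :: xs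
  | x :: xs, y :: ys =>
    if x ≤ y then x :: pvMerge xs (y :: ys) else y :: pvMerge (x :: xs) ys

-- 'while 2*v <= N: chain.append(v); v *= 2'  (the 0 < v guard only totalises: v starts ≥ 1)
def pvChain (N v : Nat) : List Int :=
  if h : 0 < v ∧ 2 * v ≤ N then (v : Int) :: pvChain N (2 * v) else []
termination_by N - v
decreasing_by omega

-- 'while 2*p3 <= N: ... ; p3 *= 3'  (the 0 < p3 guard only totalises: p3 starts at 1)
def pvOuter (N p3 : Nat) (result : List Int) : List Int :=
  if h : 0 < p3 ∧ 2 * p3 ≤ N then pvOuter N (3 * p3) (pvMerge result (pvChain N p3)) else result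
termination_by N - p3
decreasing_by omega

def GenerationGapsPratta_alt (A : List Int) : List Int :=
  (pvOuter A.length 1 []).reverse

-- ===== PRECONDITION & SPEC =====
-- Pre_ excludes only the empty list, on which A raises ValueError (math.log(0) domain error).
def Pre_GenerationGapsPratta (A : List Int) : Prop := A ≠ []
instance (A : List Int) : Decidable (Pre_GenerationGapsPratta A) := by unfold Pre_GenerationGapsPratta; infer_instance

def pvWitness_GenerationGapsPratta : List Int := [7, 7, 7, 7]

def Spec_GenerationGapsPratta (A : List Int) (out : List Int) : Prop := out = GenerationGapsPratta_alt A
instance (A : List Int) (out : List Int) : Decidable (Spec_GenerationGapsPratta A out) := by unfold Spec_GenerationGapsPratta; infer_instance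

-- ===== CLAIM (what is proved, stated in full; the proofs are below) =====
def Claim_equal_GenerationGapsPratta : Prop := ∀ (A : List Int), Dom_GenerationGapsPratta A → Pre_GenerationGapsPratta A → Spec_GenerationGapsPratta A (GenerationGapsPratta A)

-- ===== LEMMAS AND PROOFS =====

-- the value 3^i * 2^j as an Int
def pvVal (i j : Nat) : Int := (3 : Int) ^ i * (2 : Int) ^ j

-- unique factorisation of 3^i * 2^j (Nat)
theorem pv_fact_inj : ∀ (i i' j j' : Nat), (3 : Nat) ^ i * 2 ^ j = 3 ^ i' * 2 ^ j' → i = i' ∧ j = j' := by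
  intro i
  induction i with
  | zero =>
    intro i' j j' h
    cases i' with
    | zero =>
      simp at h
      exact ⟨rfl, h⟩
    | succ s =>
      exfalso
      have hdvd : (3 : Nat) ∣ 2 ^ j := ⟨3 ^ s * 2 ^ j', by simpa [pow_succ] using h.trans (by ring)⟩
      have := Nat.Prime.dvd_of_dvd_pow (p := 3) (by norm_num) hdvd
      omega
  | succ s ih =>
    intro i' j j' h
    cases i' with
    | zero =>
      exfalso
      have hdvd : (3 : Nat) ∣ 2 ^ j' := ⟨3 ^ s * 2 ^ j, by simpa [pow_succ] using h.symm.trans (by ring)⟩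
      have := Nat.Prime.dvd_of_dvd_pow (p := 3) (by norm_num) hdvd
      omega
    | succ t =>
      have h' : (3:Nat) ^ s * 2 ^ j = 3 ^ t * 2 ^ j' := by
        have : 3 * (3 ^ s * 2 ^ j) = 3 * (3 ^ t * 2 ^ j') := by
          calc 3 * ((3:Nat) ^ s * 2 ^ j) = 3 ^ (s+1) * 2 ^ j := by ring
          _ = 3 ^ (t+1) * 2 ^ j' := h
          _ = 3 * (3 ^ t * 2 ^ j') := by ring
        omega
      obtain ⟨h1, h2⟩ := ih t j j' h'
      exact ⟨by omega, h2⟩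

theorem pv_ceilLog_le (b N : Nat) (hb : 2 ≤ b) : N ≤ b ^ pvCeilLog b N := by
  have hex : ∃ x ∈ List.range (N+1), (fun k => decide (N ≤ b ^ k)) x = true := by
    refine ⟨N, List.mem_range.mpr (by omega), ?_⟩
    simp
    calc N ≤ 2 ^ N := Nat.le_of_lt (Nat.lt_two_pow_self)
    _ ≤ b ^ N := Nat.pow_le_pow_left hb N
  have hlt := List.findIdx_lt_length_of_exists hex
  have := List.findIdx_getElem (w := hlt) (p := fun k => decide (N ≤ b ^ k)) (xs := List.range (N+1))
  simpa [pvCeilLog] using this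

theorem pv_lt_ceilLog (b N i : Nat) (hb : 2 ≤ b) (h : b ^ i < N) : i < pvCeilLog b N := by
  by_contra hle
  push Not at hle
  have := Nat.pow_le_pow_right (by omega : 1 ≤ b) hle
  have h2 := pv_ceilLog_le b N hb
  have : b ^ pvCeilLog b N ≤ b ^ i := Nat.pow_le_pow_right (by omega) hle
  omega

theorem pvVal_mono (i : Nat) {j j' : Nat} (h : j < j') : pvVal i j < pvVal i j' := by
  unfold pvVal
  have h3 : (0:Int) < 3 ^ i := by positivity
  have : (2:Int) ^ j < 2 ^ j' := by
    exact_mod_cast Nat.pow_lt_pow_right (by norm_num) h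
  nlinarith

theorem pv_innerA_mem (N i : Nat) : ∀ (c a : Nat) (x : Int),
    x ∈ pvInnerA N i (List.range' a c) ↔
      ∃ j, a ≤ j ∧ j < a + c ∧ x = pvVal i j ∧ 2 * x ≤ (N : Int) := by
  intro c
  induction c with
  | zero => intro a x; simp [pvInnerA]; omega
  | succ c ih =>
    intro a x
    rw [List.range'_succ]
    by_cases hp : 2 * ((3 : Int) ^ i * (2 : Int) ^ a) > (N : Int)
    · simp only [pvInnerA, if_pos hp, List.not_mem_nil, false_iff]
      rintro ⟨j, hj1, hj2, rfl, hle⟩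
      -- antitone: pvVal i a ≤ pvVal i j
      have : pvVal i a ≤ pvVal i j := by
        rcases Nat.lt_or_ge a j with h | h
        · exact le_of_lt (pvVal_mono i h)
        · have : a = j := by omega
          simp [this]
      simp only [pvVal] at this hle
      linarith
    · simp only [pvInnerA, if_neg hp, List.mem_cons, ih]
      constructor
      · rintro (rfl | ⟨j, hj1, hj2, rfl, hle⟩)
        · exact ⟨a, by omega, by omega, rfl, not_lt.mp hp⟩
        · exact ⟨j, by omega, by omega, rfl, hle⟩
      · rintro ⟨j, hj1, hj2, rfl, hle⟩
        rcases Nat.eq_or_lt_of_le hj1 with rfl | hlt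
        · exact Or.inl rfl
        · exact Or.inr ⟨j, by omega, by omega, rfl, hle⟩

theorem pv_innerA_pairwise (N i : Nat) : ∀ (c a : Nat),
    (pvInnerA N i (List.range' a c)).Pairwise (· < ·) := by
  intro c
  induction c with
  | zero => intro a; simp [pvInnerA]
  | succ c ih =>
    intro a
    rw [List.range'_succ]
    by_cases hp : 2 * ((3 : Int) ^ i * (2 : Int) ^ a) > (N : Int)
    · simp [pvInnerA, if_pos hp]
    · simp only [pvInnerA, if_neg hp]
      refine List.Pairwise.cons ?_ (ih (a+1))
      intro y hy
      obtain ⟨j, hj1, _, rfl, _⟩ := (pv_innerA_mem N i c (a+1) y).mp hy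
      exact pvVal_mono i (by omega)

theorem pvVal_cast (i j : Nat) : pvVal i j = (((3:Nat) ^ i * 2 ^ j : Nat) : Int) := by
  unfold pvVal; push_cast; ring

theorem pv_fact_inj_int (i i' j j' : Nat) (h : pvVal i j = pvVal i' j') : i = i' ∧ j = j' := by
  rw [pvVal_cast, pvVal_cast] at h
  exact pv_fact_inj i i' j j' (by exact_mod_cast h)

-- from 2 * pvVal i j ≤ N get the exponent bounds
theorem pv_bounds (N i j : Nat) (hN : 1 ≤ N) (h : 2 * pvVal i j ≤ (N : Int)) :
    i < pvCeilLog 3 N ∧ j < pvCeilLog 2 N := by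
  rw [pvVal_cast] at h
  have hn : 2 * ((3:Nat) ^ i * 2 ^ j) ≤ N := by exact_mod_cast h
  have h3 : (3:Nat) ^ i < N := by
    have h1 : (1:Nat) ≤ 2 ^ j := Nat.one_le_two_pow
    nlinarith [Nat.one_le_two_pow (n := j), pow_pos (by norm_num : (0:Nat) < 3) i]
  have h2 : (2:Nat) ^ j < N := by
    have : (1:Nat) ≤ 3 ^ i := Nat.one_le_pow _ _ (by norm_num)
    nlinarith
  exact ⟨pv_lt_ceilLog 3 N i (by norm_num) h3, pv_lt_ceilLog 2 N j (by norm_num) h2⟩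

theorem pv_gaps_eq (N : Nat) :
    (List.range (pvCeilLog 3 N)).foldl
        (fun acc i => acc ++ pvInnerA N i (List.range (pvCeilLog 2 N))) []
      = (List.range (pvCeilLog 3 N)).flatMap (fun i => pvInnerA N i (List.range (pvCeilLog 2 N))) := by
  simpa using PySem.List.foldl_append_eq_flatMap (fun i => pvInnerA N i (List.range (pvCeilLog 2 N))) (List.range (pvCeilLog 3 N)) []

theorem pv_gaps_mem (N : Nat) (hN : 1 ≤ N) (x : Int) :
    x ∈ (List.range (pvCeilLog 3 N)).foldl
        (fun acc i => acc ++ pvInnerA N i (List.range (pvCeilLog 2 N))) [] ↔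
      ∃ i j, x = pvVal i j ∧ 2 * x ≤ (N : Int) := by
  rw [pv_gaps_eq, List.mem_flatMap]
  constructor
  · rintro ⟨i, hi, hx⟩
    rw [List.range_eq_range'] at hx
    obtain ⟨j, _, _, rfl, hle⟩ := (pv_innerA_mem N i _ 0 x).mp hx
    exact ⟨i, j, rfl, hle⟩
  · rintro ⟨i, j, rfl, hle⟩
    obtain ⟨hi, hj⟩ := pv_bounds N i j hN hle
    refine ⟨i, List.mem_range.mpr hi, ?_⟩
    rw [List.range_eq_range']
    exact (pv_innerA_mem N i _ 0 _).mpr ⟨j, by omega, by omega, rfl, hle⟩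

theorem pv_gaps_nodup (N : Nat) :
    ((List.range (pvCeilLog 3 N)).foldl
        (fun acc i => acc ++ pvInnerA N i (List.range (pvCeilLog 2 N))) []).Nodup := by
  rw [pv_gaps_eq, List.nodup_flatMap]
  constructor
  · intro i _
    rw [List.range_eq_range']
    exact (pv_innerA_pairwise N i _ 0).imp (fun h => ne_of_lt h)
  · refine List.Pairwise.imp_of_mem ?_ List.pairwise_lt_range
    intro i i' hi hi' hlt x hx hx'
    rw [List.range_eq_range'] at hx hx'
    obtain ⟨j, _, _, rfl, _⟩ := (pv_innerA_mem N i _ 0 x).mp hx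
    obtain ⟨j', _, _, heq, _⟩ := (pv_innerA_mem N i' _ 0 _).mp hx'
    obtain ⟨hii, -⟩ := pv_fact_inj_int i i' j j' heq
    omega

theorem pv_merge_perm : ∀ (xs ys : List Int), (pvMerge xs ys).Perm (xs ++ ys) := by
  intro xs
  induction xs with
  | nil => intro ys; simp [pvMerge]
  | cons x xs ihx =>
    intro ys
    induction ys with
    | nil => simp [pvMerge]
    | cons y ys ihy =>
      rw [pvMerge]
      split_ifs with h
      · exact (ihx (y :: ys)).cons x
      · refine (ihy.cons y).trans ?_
        exact (List.perm_middle (a := y) (l₁ := x :: xs) (l₂ := ys)).symm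

theorem pv_merge_mem (xs ys : List Int) (z : Int) : z ∈ pvMerge xs ys ↔ z ∈ xs ∨ z ∈ ys := by
  rw [(pv_merge_perm xs ys).mem_iff, List.mem_append]

theorem pv_merge_pairwise : ∀ (xs ys : List Int), xs.Pairwise (· < ·) → ys.Pairwise (· < ·) →
    (∀ x ∈ xs, x ∉ ys) → (pvMerge xs ys).Pairwise (· < ·) := by
  intro xs
  induction xs with
  | nil => intro ys _ h _; simpa [pvMerge] using h
  | cons x xs ihx =>
    intro ys
    induction ys with
    | nil => intro h _ _; simpa [pvMerge] using h
    | cons y ys ihy =>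
      intro hx hy hd
      rw [pvMerge]
      split_ifs with h
      · have hxy : x < y := lt_of_le_of_ne h (hd x (by simp) ∘ (by simp [·]))
        refine List.Pairwise.cons ?_ (ihx (y :: ys) (List.pairwise_cons.mp hx).2 hy ?_)
        · intro z hz
          rcases (pv_merge_mem xs (y :: ys) z).mp hz with hz | hz
          · exact (List.pairwise_cons.mp hx).1 z hz
          · rcases List.mem_cons.mp hz with rfl | hz
            · exact hxy
            · exact lt_trans hxy ((List.pairwise_cons.mp hy).1 z hz)
        · intro z hz; exact hd z (by simp [hz])
      · have hyx : y < x := by omega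
        refine List.Pairwise.cons ?_ (ihy hx (List.pairwise_cons.mp hy).2 ?_)
        · intro z hz
          rcases (pv_merge_mem (x :: xs) ys z).mp hz with hz | hz
          · rcases List.mem_cons.mp hz with rfl | hz
            · exact hyx
            · exact lt_trans hyx ((List.pairwise_cons.mp hx).1 z hz)
          · exact (List.pairwise_cons.mp hy).1 z hz
        · intro z hz hzy; exact hd z hz (by simp [hzy])


theorem pv_chain_mem (N : Nat) : ∀ (v : Nat), 0 < v → ∀ x : Int,
    (x ∈ pvChain N v ↔ ∃ j : Nat, x = ((v : Int)) * 2 ^ j ∧ 2 * x ≤ (N : Int)) := by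
  intro v
  induction v using pvChain.induct N with
  | case1 v h ih =>
    intro _ x
    rw [pvChain, dif_pos h]
    constructor
    · rintro hx
      rcases List.mem_cons.mp hx with rfl | hx
      · exact ⟨0, by simp, by omega⟩
      · obtain ⟨j, rfl, hle⟩ := (ih (by omega) x).mp hx
        exact ⟨j + 1, by push_cast; ring, hle⟩
    · rintro ⟨j, rfl, hle⟩
      cases j with
      | zero => simp
      | succ j =>
        refine List.mem_cons_of_mem _ ((ih (by omega) _).mpr ⟨j, by push_cast; ring, ?_⟩)
        · exact hle
  | case2 v h =>
    intro hv x
    rw [pvChain, dif_neg h]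
    simp only [List.not_mem_nil, false_iff]
    rintro ⟨j, rfl, hle⟩
    have h1 : (1:Int) ≤ 2 ^ j := one_le_pow₀ (by norm_num)
    have hv1 : (1:Int) ≤ (v:Int) := by exact_mod_cast hv
    have : (v:Int) ≤ (v:Int) * 2 ^ j := le_mul_of_one_le_right (by omega) h1
    have hN : (N:Int) < 2 * v := by exact_mod_cast (by omega : N < 2 * v)
    nlinarith

theorem pv_chain_pairwise (N : Nat) : ∀ (v : Nat), (pvChain N v).Pairwise (· < ·) := by
  intro v
  induction v using pvChain.induct N with
  | case1 v h ih =>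
    rw [pvChain, dif_pos h]
    refine List.Pairwise.cons ?_ ih
    intro z hz
    obtain ⟨j, rfl, -⟩ := (pv_chain_mem N (2 * v) (by omega) z).mp hz
    have h1 : (1:Int) ≤ 2 ^ j := one_le_pow₀ (by norm_num)
    have hv1 : (1:Int) ≤ (v:Int) := by exact_mod_cast h.1
    push_cast
    nlinarith
  | case2 v h => rw [pvChain, dif_neg h]; simp

theorem pv_outer_char (N : Nat) : ∀ (p3 : Nat) (result : List Int), ∀ (k : Nat), p3 = 3 ^ k →
    result.Pairwise (· < ·) →
    (∀ x, x ∈ result ↔ ∃ i j, i < k ∧ x = pvVal i j ∧ 2 * x ≤ (N : Int)) →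
    (pvOuter N p3 result).Pairwise (· < ·) ∧
      (∀ x, x ∈ pvOuter N p3 result ↔ ∃ i j, x = pvVal i j ∧ 2 * x ≤ (N : Int)) := by
  intro p3 result
  induction p3, result using pvOuter.induct N with
  | case1 p3 result h ih =>
    rintro k rfl hpw hmem
    rw [pvOuter, dif_pos h]
    have hchain_mem : ∀ x : Int, x ∈ pvChain N (3 ^ k) ↔ ∃ j, x = pvVal k j ∧ 2 * x ≤ (N : Int) := by
      intro x
      rw [pv_chain_mem N (3 ^ k) (by positivity) x]
      constructor
      · rintro ⟨j, rfl, hle⟩; exact ⟨j, by unfold pvVal; push_cast; ring, hle⟩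
      · rintro ⟨j, rfl, hle⟩; exact ⟨j, by unfold pvVal; push_cast; ring, hle⟩
    have hdisj : ∀ x ∈ result, x ∉ pvChain N (3 ^ k) := by
      intro x hx hx'
      obtain ⟨i, j, hik, rfl, -⟩ := (hmem x).mp hx
      obtain ⟨j', heq, -⟩ := (hchain_mem _).mp hx'
      obtain ⟨rfl, -⟩ := pv_fact_inj_int i k j j' heq
      omega
    refine ih (k + 1) (by ring) (pv_merge_pairwise _ _ hpw (pv_chain_pairwise N _) hdisj) ?_
    intro x
    rw [pv_merge_mem, hmem, hchain_mem]
    constructor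
    · rintro (⟨i, j, hik, rfl, hle⟩ | ⟨j, rfl, hle⟩)
      · exact ⟨i, j, by omega, rfl, hle⟩
      · exact ⟨k, j, by omega, rfl, hle⟩
    · rintro ⟨i, j, hik, rfl, hle⟩
      rcases Nat.lt_or_ge i k with hik' | hik'
      · exact Or.inl ⟨i, j, hik', rfl, hle⟩
      · have : i = k := by omega
        exact Or.inr ⟨j, by rw [this], hle⟩
  | case2 p3 result h =>
    rintro k rfl hpw hmem
    rw [pvOuter, dif_neg h]
    refine ⟨hpw, fun x => (hmem x).trans ?_⟩
    constructor
    · rintro ⟨i, j, _, rfl, hle⟩; exact ⟨i, j, rfl, hle⟩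
    · rintro ⟨i, j, rfl, hle⟩
      refine ⟨i, j, ?_, rfl, hle⟩
      by_contra hik
      push Not at hik
      have h3 : (0:Nat) < 3 ^ k := by positivity
      have hN : (N:Int) < 2 * (3:Int) ^ k := by
        have : ¬ (2 * 3 ^ k ≤ N) := fun hc => h ⟨h3, hc⟩
        have : N < 2 * 3 ^ k := by omega
        exact_mod_cast (by push_cast; exact_mod_cast this : (N:Int) < 2 * ((3:Nat):Int) ^ k)
      have h1 : (1:Int) ≤ 2 ^ j := one_le_pow₀ (by norm_num)
      have h2 : (3:Int) ^ k ≤ 3 ^ i := pow_le_pow_right₀ (by norm_num) hik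
      unfold pvVal at hle
      nlinarith [pow_pos (by norm_num : (0:Int) < 3) i]

-- ===== VERDICT (by name: the statement is the Claim_ definition above) =====
theorem GenerationGapsPratta_spec : Claim_equal_GenerationGapsPratta := by
  intro A _ hpre
  unfold Spec_GenerationGapsPratta GenerationGapsPratta GenerationGapsPratta_alt
  have hN1 : 1 ≤ A.length := by
    cases A with
    | nil => exact absurd rfl hpre
    | cons a as => simp
  obtain ⟨hasc_pw, hasc_mem⟩ := pv_outer_char A.length 1 [] 0 (by norm_num) (by simp) (by simp)
  refine PySem.List.sorted_rev_eq_of_perm_of_pairwise_gt _ _ _ ?_ ?_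
  · refine (List.reverse_perm _).trans ?_
    refine (List.perm_ext_iff_of_nodup (hasc_pw.imp ne_of_lt) (pv_gaps_nodup A.length)).mpr ?_
    intro x
    rw [hasc_mem x, pv_gaps_mem A.length hN1 x]
  · exact List.pairwise_reverse.mpr hasc_pw
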